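-- pv_equiv track=rewrite | github.com/anandjin/YuantsDesktopEdgeSegmentation2 | src/color_distribution_regionGrowing.py | are_adjacent
-- ===== SOURCE A (Python) =====
-- def are_adjacent(pixels1, pixels2):
--     adjacent_offsets = [(-1, -1), (-1, 0), (-1, 1), (0, -1), (0, 1), (1, -1), (1, 0), (1, 1)]
--     pixels1_set = set(map(tuple, pixels1))
--     pixels2_set = set(map(tuple, pixels2))
--     for (y1, x1) in pixels1_set:
--         for dy, dx in adjacent_offsets:
--             if (y1 + dy, x1 + dx) in pixels2_set:
--                 return True
--     return False
-- ===== SOURCE B (Python) =====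
-- def are_adjacent(pixels1, pixels2):
--     # Two pixel groups are 8-adjacent iff some pair of pixels is at
--     # Chebyshev distance exactly 1 (distance 0 = same pixel, not adjacent).
--     return any(max(abs(y1 - y2), abs(x1 - x2)) == 1
--                for (y1, x1) in pixels1
--                for (y2, x2) in pixels2)
-- ===== Notes on version B (the rewrite author's own statement) =====
-- stated objective: simpler
-- what changed: B drops A's set construction and 8-offset neighbor enumeration entirely and instead tests pairs of pixels directly with the arithmetic criterion Chebyshev distance == 1.
import Mathlib
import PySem

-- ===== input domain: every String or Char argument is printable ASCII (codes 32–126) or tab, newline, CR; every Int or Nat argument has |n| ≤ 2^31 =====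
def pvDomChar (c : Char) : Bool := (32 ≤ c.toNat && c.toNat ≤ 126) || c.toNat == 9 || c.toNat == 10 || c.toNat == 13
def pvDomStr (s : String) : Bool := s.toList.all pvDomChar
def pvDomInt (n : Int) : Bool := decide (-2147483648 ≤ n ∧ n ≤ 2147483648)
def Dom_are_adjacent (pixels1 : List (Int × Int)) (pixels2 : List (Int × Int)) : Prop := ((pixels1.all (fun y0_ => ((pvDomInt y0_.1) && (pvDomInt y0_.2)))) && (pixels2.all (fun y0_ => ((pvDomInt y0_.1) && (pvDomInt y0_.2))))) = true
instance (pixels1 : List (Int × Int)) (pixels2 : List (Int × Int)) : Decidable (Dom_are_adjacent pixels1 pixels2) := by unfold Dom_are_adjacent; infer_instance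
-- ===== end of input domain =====

-- B replaces A's set construction and 8-offset neighbor-membership scan by a direct pairwise test "Chebyshev distance == 1" (objective: simpler, no sets or offset table; same True/False result).

-- ===== PORT A =====
-- Port of A: dedup both lists into sets, then nested scans over pixels1_set and
-- the 8 offsets with an early-exit membership test in pixels2_set (order-independent, so `any` is exact).
def pvOffsets : List (Int × Int) := [(-1, -1), (-1, 0), (-1, 1), (0, -1), (0, 1), (1, -1), (1, 0), (1, 1)]

def are_adjacent (pixels1 : List (Int × Int)) (pixels2 : List (Int × Int)) : Bool :=
  let pixels1_set : PySem.Set (Int × Int) := PySem.Set.ofList pixels1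
  let pixels2_set : PySem.Set (Int × Int) := PySem.Set.ofList pixels2
  pixels1_set.any (fun p =>
    pvOffsets.any (fun d => PySem.Set.contains pixels2_set (p.1 + d.1, p.2 + d.2)))

-- ===== PORT B =====
-- Port of B: `any` over pairs of the raw lists with the arithmetic test max(|dy|,|dx|) == 1.
def are_adjacent_alt (pixels1 : List (Int × Int)) (pixels2 : List (Int × Int)) : Bool :=
  pixels1.any (fun p => pixels2.any (fun q =>
    max (p.1 - q.1).natAbs (p.2 - q.2).natAbs == 1))

-- ===== PRECONDITION & SPEC =====
def Spec_are_adjacent (pixels1 : List (Int × Int)) (pixels2 : List (Int × Int)) (out : Bool) : Prop := out = are_adjacent_alt pixels1 pixels2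
instance (pixels1 : List (Int × Int)) (pixels2 : List (Int × Int)) (out : Bool) : Decidable (Spec_are_adjacent pixels1 pixels2 out) := by unfold Spec_are_adjacent; infer_instance

-- ===== CLAIM (what is proved, stated in full; the proofs are below) =====
def Claim_equal_are_adjacent : Prop := ∀ (pixels1 : List (Int × Int)) (pixels2 : List (Int × Int)), Dom_are_adjacent pixels1 pixels2 → Spec_are_adjacent pixels1 pixels2 (are_adjacent pixels1 pixels2)

-- ===== LEMMAS AND PROOFS =====

-- ===== VERDICT (by name: the statement is the Claim_ definition above) =====
lemma are_adjacent_iff (pixels1 pixels2 : List (Int × Int)) :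
    are_adjacent pixels1 pixels2 = true ↔
      ∃ p ∈ pixels1, ∃ d ∈ pvOffsets, (p.1 + d.1, p.2 + d.2) ∈ pixels2 := by
  unfold are_adjacent
  simp only [List.any_eq_true, PySem.Set.contains_iff, PySem.Set.mem_ofList]

lemma offset_iff (p q : Int × Int) :
    (∃ d ∈ pvOffsets, (p.1 + d.1, p.2 + d.2) = q) ↔
      max (p.1 - q.1).natAbs (p.2 - q.2).natAbs = 1 := by
  simp only [pvOffsets, List.mem_cons, List.not_mem_nil, or_false, Prod.ext_iff]
  constructor
  · rintro ⟨d, hd, h1, h2⟩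
    rcases hd with h|h|h|h|h|h|h|h <;> obtain ⟨e1, e2⟩ := h <;> omega
  · intro h
    refine ⟨(q.1 - p.1, q.2 - p.2), ?_, by ring, by ring⟩
    have h1 : q.1 - p.1 = -1 ∨ q.1 - p.1 = 0 ∨ q.1 - p.1 = 1 := by omega
    have h2 : q.2 - p.2 = -1 ∨ q.2 - p.2 = 0 ∨ q.2 - p.2 = 1 := by omega
    have h3 : ¬ (q.1 - p.1 = 0 ∧ q.2 - p.2 = 0) := by omega
    rcases h1 with a|a|a <;> rcases h2 with b|b|b <;>
      simp [a, b] at h3 ⊢ <;> omega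

lemma are_adjacent_alt_iff (pixels1 pixels2 : List (Int × Int)) :
    are_adjacent_alt pixels1 pixels2 = true ↔
      ∃ p ∈ pixels1, ∃ q ∈ pixels2, max (p.1 - q.1).natAbs (p.2 - q.2).natAbs = 1 := by
  unfold are_adjacent_alt
  simp only [List.any_eq_true, beq_iff_eq]

-- ===== VERDICT (by name: the statement is the Claim_ definition above) =====
theorem are_adjacent_spec : Claim_equal_are_adjacent := by
  intro pixels1 pixels2 _
  unfold Spec_are_adjacent
  rw [Bool.eq_iff_iff, are_adjacent_iff, are_adjacent_alt_iff]
  constructor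
  · rintro ⟨p, hp, d, hd, hmem⟩
    exact ⟨p, hp, _, hmem, (offset_iff p _).mp ⟨d, hd, rfl⟩⟩
  · rintro ⟨p, hp, q, hq, h⟩
    obtain ⟨d, hd, hdq⟩ := (offset_iff p q).mpr h
    exact ⟨p, hp, d, hd, hdq ▸ hq⟩
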